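-- pv_equiv track=rewrite | github.com/Antheagao/ai-container-optimization | final_project_v2.py | get_hashed_words
-- ===== SOURCE A (Python) =====
-- def get_hashed_words(table: str) -> list[str]:
--     # Declare variables
--     words = []
--     word = ''
--
--     # Get the words from the hashed table
--     for index in range(len(table)):
--         if table[index] == '-':
--             words.append(word)
--             word = ''
--         if table[index] == ' ':
--             word += table[index]
--         if table[index].isalpha() or table[index] == '+':
--             word += table[index]
--     return words
-- ===== SOURCE B (Python) =====
-- def get_hashed_words(table: str) -> list[str]:
--     # Split on '-' and drop the trailing segment (A never emits the part
--     # after the last dash), then keep only letters, spaces and '+'.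
--     return [''.join(c for c in seg if c.isalpha() or c == ' ' or c == '+')
--             for seg in table.split('-')[:-1]]
-- ===== Notes on version B (the rewrite author's own statement) =====
-- stated objective: simpler
-- what changed: Replaced A's per-character state machine (mutable word buffer flushed on each dash) with a two-phase structure: split the string on the dash and drop the trailing segment, then filter each segment's characters.
import Mathlib
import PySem

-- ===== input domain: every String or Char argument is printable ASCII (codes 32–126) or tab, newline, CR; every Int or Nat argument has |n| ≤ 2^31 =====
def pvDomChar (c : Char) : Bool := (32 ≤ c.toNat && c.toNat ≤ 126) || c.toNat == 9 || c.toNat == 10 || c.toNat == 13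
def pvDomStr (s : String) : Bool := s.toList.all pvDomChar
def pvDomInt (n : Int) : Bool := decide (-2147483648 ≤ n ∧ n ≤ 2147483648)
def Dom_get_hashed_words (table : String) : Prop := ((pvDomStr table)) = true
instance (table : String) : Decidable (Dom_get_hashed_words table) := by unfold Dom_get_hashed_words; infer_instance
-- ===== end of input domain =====

-- B replaces A's per-character state machine with split('-')[:-1] followed by a
-- per-segment character filter (objective: simpler).


-- ===== PORT A =====
-- A's loop: per character, flush the word buffer on '-', append spaces,
-- append letters and '+'.
def pvAGo : List Char → List String → List Char → List String
  | [], words, _word => words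
  | c :: rest, words, word =>
    let st := if c == '-' then (words ++ [String.ofList word], ([] : List Char)) else (words, word)
    let w2 := if c == ' ' then st.2 ++ [c] else st.2
    let w3 := if PySem.Chars.isalpha c || c == '+' then w2 ++ [c] else w2
    pvAGo rest st.1 w3

def get_hashed_words (table : String) : List String := pvAGo table.toList [] []

-- ===== PORT B =====
def pvKeep (c : Char) : Bool := PySem.Chars.isalpha c || c == ' ' || c == '+'

def get_hashed_words_alt (table : String) : List String :=
  ((table.toList.splitOn '-').dropLast).map (fun seg => String.ofList (seg.filter pvKeep))

-- ===== PRECONDITION & SPEC =====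
def Spec_get_hashed_words (table : String) (out : List String) : Prop := out = get_hashed_words_alt table
instance (table : String) (out : List String) : Decidable (Spec_get_hashed_words table out) := by unfold Spec_get_hashed_words; infer_instance

-- ===== CLAIM (what is proved, stated in full; the proofs are below) =====
def Claim_equal_get_hashed_words : Prop := ∀ (table : String), Dom_get_hashed_words table → Spec_get_hashed_words table (get_hashed_words table)

-- ===== LEMMAS AND PROOFS =====

-- map over the dropped-last segments, the first one prefixed by the pending buffer
def pvMapFirst (word : List Char) : List (List Char) → List String
  | [] => []
  | s :: rest => String.ofList (word ++ s.filter pvKeep) :: rest.map (fun seg => String.ofList (seg.filter pvKeep))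

theorem pvMapFirst_nil_buf (segs : List (List Char)) :
    pvMapFirst [] segs = segs.map (fun seg => String.ofList (seg.filter pvKeep)) := by
  cases segs <;> simp [pvMapFirst]

theorem pvAGo_eq (cs : List Char) : ∀ (words : List String) (word : List Char),
    pvAGo cs words word = words ++ pvMapFirst word ((cs.splitOn '-').dropLast) := by
  induction cs with
  | nil => intro words word; simp [pvAGo, List.splitOn, List.splitOnP_nil, pvMapFirst]
  | cons c rest ih =>
    intro words word
    obtain ⟨s0, segs, hsegs⟩ : ∃ s0 segs, rest.splitOn '-' = s0 :: segs := by
      cases h : rest.splitOn '-' with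
      | nil => exact absurd h (List.splitOnP_ne_nil _ _)
      | cons a b => exact ⟨a, b, rfl⟩
    by_cases hc : c = '-'
    · subst hc
      have h3 : (PySem.Chars.isalpha '-' || '-' == '+') = false := by decide
      have hsplit : (('-'::rest).splitOn '-') = [] :: s0 :: segs := by
        simp only [List.splitOn, List.splitOnP_cons]
        simpa [List.splitOn] using hsegs
      rw [hsplit, List.dropLast_cons₂]
      simp only [pvAGo, h3, Bool.false_eq_true, if_false, ih, hsegs]
      cases segs <;> simp [pvMapFirst, List.map_dropLast]
    · have hcb : (c == '-') = false := by simp [hc]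
      have hsplit : ((c::rest).splitOn '-') = (c::s0) :: segs := by
        have h : rest.splitOnP (· == '-') = s0 :: segs := hsegs
        simp [List.splitOn, List.splitOnP_cons, hcb, h]
      simp only [pvAGo, hcb, Bool.false_eq_true, if_false, ih, hsegs, hsplit]
      have hbuf : (if (PySem.Chars.isalpha c || c == '+') = true
            then (if (c == ' ') = true then word ++ [c] else word) ++ [c]
            else (if (c == ' ') = true then word ++ [c] else word))
          = word ++ (if pvKeep c then [c] else []) := by
        by_cases h1 : c = ' '
        · subst h1
          have ha : PySem.Chars.isalpha ' ' = false := by decide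
          have hk : pvKeep ' ' = true := by decide
          simp [ha, hk]
        · have hs : (c == ' ') = false := by simp [h1]
          have hkeq : pvKeep c = (PySem.Chars.isalpha c || c == '+') := by
            simp [pvKeep, hs, Bool.or_comm]
          rw [hkeq]
          by_cases h2 : (PySem.Chars.isalpha c || c == '+') = true <;> simp [h2, hs]
      rw [hbuf]
      have hstep : pvMapFirst (word ++ (if pvKeep c then [c] else [])) ((s0 :: segs).dropLast)
          = pvMapFirst word (((c::s0) :: segs).dropLast) := by
        cases segs with
        | nil => simp [pvMapFirst]
        | cons b bs =>
          simp only [List.dropLast_cons₂, pvMapFirst, List.filter_cons]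
          by_cases hk : pvKeep c <;> simp [hk]
      rw [hstep]

-- ===== VERDICT (by name: the statement is the Claim_ definition above) =====
theorem get_hashed_words_spec : Claim_equal_get_hashed_words := by
  intro table _
  unfold Spec_get_hashed_words get_hashed_words get_hashed_words_alt
  rw [pvAGo_eq, pvMapFirst_nil_buf]
  simp
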